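-- pv_equiv track=rewrite | github.com/HabsaTheDog/Trainscanner | scripts/data/import-overture-places.py | normalize_station_name
-- ===== SOURCE A (Python) =====
-- def normalize_station_name(value: str) -> str:
--     output = []
--     previous_space = False
--     for char in (value or "").lower():
--         if char.isalnum():
--             output.append(char)
--             previous_space = False
--             continue
--         if not previous_space:
--             output.append(" ")
--             previous_space = True
--     return "".join(output).strip()
-- ===== SOURCE B (Python) =====
-- def normalize_station_name(value: str) -> str:
--     text = (value or "").lower()
--     tokens = []
--     i, n = 0, len(text)
--     while i < n:
--         if text[i].isalnum():
--             j = i + 1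
--             while j < n and text[j].isalnum():
--                 j += 1
--             tokens.append(text[i:j])
--             i = j
--         else:
--             i += 1
--     return " ".join(tokens)
-- ===== Notes on version B (the rewrite author's own statement) =====
-- stated objective: idiomatic
-- what changed: Instead of a char-by-char state machine with a previous_space flag plus a final strip, B scans the string into maximal alphanumeric runs (tokens) and joins them with single spaces, so no strip or flag is needed.
import Mathlib
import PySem

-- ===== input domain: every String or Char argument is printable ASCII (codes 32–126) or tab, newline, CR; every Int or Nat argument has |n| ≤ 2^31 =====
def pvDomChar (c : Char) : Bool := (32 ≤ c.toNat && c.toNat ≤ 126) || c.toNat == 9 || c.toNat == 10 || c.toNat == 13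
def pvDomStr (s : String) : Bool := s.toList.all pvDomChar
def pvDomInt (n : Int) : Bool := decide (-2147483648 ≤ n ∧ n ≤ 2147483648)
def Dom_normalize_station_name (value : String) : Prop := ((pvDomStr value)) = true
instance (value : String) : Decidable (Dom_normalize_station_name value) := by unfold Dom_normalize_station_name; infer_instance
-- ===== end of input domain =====

-- B replaces A's previous_space flag machine + final strip by an explicit scan into maximal
-- alphanumeric runs joined with single spaces (idiomatic tokenization; same cost).

-- ===== PORT A =====
-- literal port: fold over the lowered characters carrying (output, previous_space); then strip.
def normalize_station_name (value : String) : String :=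
  let base : String := if value = "" then "" else value   -- (value or "")
  let st :=
    (PySem.Chars.lower base.toList).foldl
      (fun (s : List Char × Bool) c =>
        if PySem.Chars.isalnum c then (s.1 ++ [c], false)
        else if !s.2 then (s.1 ++ [' '], true) else s)
      ([], false)
  String.ofList (PySem.Chars.strip st.1)   -- "".join(output).strip()

-- ===== PORT B =====
-- the inner while-loop of Source B: split off the maximal alnum run at the current position
def altTokens : List Char → List (List Char)
  | [] => []
  | c :: cs =>
    if PySem.Chars.isalnum c then
      (c :: cs.takeWhile PySem.Chars.isalnum) :: altTokens (cs.dropWhile PySem.Chars.isalnum)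
    else altTokens cs
termination_by l => l.length
decreasing_by
  · simpa [Nat.lt_succ_iff] using List.length_dropWhile_le PySem.Chars.isalnum cs
  · simp

def normalize_station_name_alt (value : String) : String :=
  let text := PySem.Chars.lower (if value = "" then "" else value).toList
  String.ofList (PySem.Chars.join [' '] (altTokens text))   -- " ".join(tokens)

-- ===== PRECONDITION & SPEC =====
def Spec_normalize_station_name (value : String) (out : String) : Prop := out = normalize_station_name_alt value
instance (value : String) (out : String) : Decidable (Spec_normalize_station_name value out) := by unfold Spec_normalize_station_name; infer_instance

-- ===== CLAIM (what is proved, stated in full; the proofs are below) =====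
def Claim_equal_normalize_station_name : Prop := ∀ (value : String), Dom_normalize_station_name value → Spec_normalize_station_name value (normalize_station_name value)

-- ===== LEMMAS AND PROOFS =====

-- the string A's loop has produced, as a function of the remaining input and the flag
def pvRaw : List Char → Bool → List Char
  | [], _ => []
  | c :: cs, prev =>
    if PySem.Chars.isalnum c then c :: pvRaw cs false
    else if prev then pvRaw cs prev else ' ' :: pvRaw cs true

def pvStep (s : List Char × Bool) (c : Char) : List Char × Bool :=
  if PySem.Chars.isalnum c then (s.1 ++ [c], false)
  else if !s.2 then (s.1 ++ [' '], true) else s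

lemma pvAlnumNotSpace {c : Char} (h : PySem.Chars.isalnum c = true) :
    PySem.Chars.isspace c = false := by
  have h' : 48 ≤ c.toNat ∧ c.toNat ≤ 57 ∨ 65 ≤ c.toNat ∧ c.toNat ≤ 90 ∨ 97 ≤ c.toNat ∧ c.toNat ≤ 122 := by
    simp only [PySem.Chars.isalnum, PySem.Chars.isalpha, PySem.Chars.isdigit, PySem.Chars.isupper,
      PySem.Chars.islower, Bool.or_eq_true, Bool.and_eq_true, decide_eq_true_eq, Char.le_def] at h
    simp only [Char.toNat]
    rcases h with (⟨h1,h2⟩|⟨h1,h2⟩)|⟨h1,h2⟩ <;>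
      [right;right;left] <;>
      first
        | exact Or.inl ⟨UInt32.le_iff_toNat_le.mp h1, UInt32.le_iff_toNat_le.mp h2⟩
        | exact Or.inr ⟨UInt32.le_iff_toNat_le.mp h1, UInt32.le_iff_toNat_le.mp h2⟩
        | exact ⟨UInt32.le_iff_toNat_le.mp h1, UInt32.le_iff_toNat_le.mp h2⟩
  simp only [PySem.Chars.isspace, Bool.or_eq_false_iff, Bool.and_eq_false_iff,
    decide_eq_false_iff_not]
  omega

lemma pvFold_fst (cs : List Char) (out : List Char) (prev : Bool) :
    (cs.foldl pvStep (out, prev)).1 = out ++ pvRaw cs prev := by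
  induction cs generalizing out prev with
  | nil => simp [pvRaw]
  | cons c cs ih =>
    rw [List.foldl_cons]
    by_cases h : PySem.Chars.isalnum c = true
    · rw [show pvStep (out, prev) c = (out ++ [c], false) from by simp [pvStep, h], ih]
      simp [pvRaw, h]
    · cases prev
      · rw [show pvStep (out, false) c = (out ++ [' '], true) from by simp [pvStep, h], ih]
        simp [pvRaw, h]
      · rw [show pvStep (out, true) c = (out, true) from by simp [pvStep, h], ih]
        simp [pvRaw, h]

lemma pvRaw_true_of_none (cs : List Char) (h : ∀ x ∈ cs, PySem.Chars.isalnum x = false) :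
    pvRaw cs true = [] := by
  induction cs with
  | nil => rfl
  | cons c cs ih =>
    simp [pvRaw, h c (by simp)]
    exact ih (fun x hx => h x (by simp [hx]))

lemma pvAltTokens_of_none (cs : List Char) (h : ∀ x ∈ cs, PySem.Chars.isalnum x = false) :
    altTokens cs = [] := by
  induction cs with
  | nil => rw [altTokens]
  | cons c cs ih =>
    rw [altTokens]
    simp [h c (by simp)]
    exact ih (fun x hx => h x (by simp [hx]))

lemma pvRaw_run (t d : List Char) (h : ∀ x ∈ t, PySem.Chars.isalnum x = true) :
    pvRaw (t ++ d) false = t ++ pvRaw d false := by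
  induction t with
  | nil => simp
  | cons c t ih =>
    simp [pvRaw, h c (by simp)]
    exact ih (fun x hx => h x (by simp [hx]))

lemma pvRstrip_append (xs ys : List Char) (h : PySem.Chars.rstrip ys ≠ []) :
    PySem.Chars.rstrip (xs ++ ys) = xs ++ PySem.Chars.rstrip ys := by
  unfold PySem.Chars.rstrip at *
  rw [List.reverse_append, List.dropWhile_append]
  have : (ys.reverse.dropWhile PySem.Chars.isspace).isEmpty = false := by
    simpa [List.isEmpty_iff] using h
  simp [this]

lemma pvRstrip_of_noSpace (xs : List Char) (h : ∀ x ∈ xs, PySem.Chars.isspace x = false) :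
    PySem.Chars.rstrip xs = xs := by
  unfold PySem.Chars.rstrip
  rw [List.dropWhile_eq_self_iff.mpr, List.reverse_reverse]
  intro hl
  simp only [Bool.not_eq_true]
  exact h _ (List.mem_reverse.mp (List.getElem_mem hl))

lemma pvAltTokens_ne_nil (cs : List Char) (x : Char) (hx : x ∈ cs)
    (hfx : PySem.Chars.isalnum x = true) : altTokens cs ≠ [] := by
  induction cs with
  | nil => cases hx
  | cons c cs ih =>
    rw [altTokens]
    by_cases h : PySem.Chars.isalnum c = true
    · simp [h]
    · rw [if_neg (by simp [h])]
      rcases List.mem_cons.mp hx with hx | hx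
      · exact absurd hfx (by simp [hx ▸ h])
      · exact ih hx

lemma pvJoin_ne_nil (a : Char) (t : List Char) (ts : List (List Char)) :
    PySem.Chars.join [' '] ((a :: t) :: ts) ≠ [] := by
  cases ts <;> simp [PySem.Chars.join, List.intercalate]

lemma pvAltTokens_tokens_ne_nil : ∀ (m : Nat) (l : List Char), l.length ≤ m →
    ∀ v ∈ altTokens l, v ≠ [] := by
  intro m
  induction m with
  | zero =>
    intro l hl v hv
    have : l = [] := List.length_eq_zero_iff.mp (Nat.le_zero.mp hl)
    subst this; rw [altTokens] at hv; cases hv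
  | succ m ihm =>
    intro l hl v hv
    match l with
    | [] => rw [altTokens] at hv; cases hv
    | a :: l' =>
      rw [altTokens] at hv
      by_cases ha : PySem.Chars.isalnum a = true
      · rw [if_pos ha] at hv
        rcases List.mem_cons.mp hv with hv | hv
        · simp [hv]
        · exact ihm (l'.dropWhile PySem.Chars.isalnum)
            (by have := List.length_dropWhile_le PySem.Chars.isalnum l'
                simp only [List.length_cons] at hl; omega) v hv
      · rw [if_neg (by simp [ha])] at hv
        exact ihm l' (by simp only [List.length_cons] at hl; omega) v hv

lemma pvMain : ∀ n (cs : List Char), cs.length ≤ n →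
    PySem.Chars.rstrip (pvRaw cs true) = PySem.Chars.join [' '] (altTokens cs) := by
  intro n
  induction n with
  | zero =>
    intro cs h
    have : cs = [] := List.length_eq_zero_iff.mp (Nat.le_zero.mp h)
    subst this
    simp [pvRaw, altTokens, PySem.Chars.rstrip, PySem.Chars.join, List.intercalate]
  | succ n ih =>
    intro cs hlen
    match cs with
    | [] => simp [pvRaw, altTokens, PySem.Chars.rstrip, PySem.Chars.join, List.intercalate]
    | c :: cs' =>
      by_cases hc : PySem.Chars.isalnum c = true
      · -- a token starts here
        obtain ⟨t, ht⟩ : ∃ t, cs'.takeWhile PySem.Chars.isalnum = t := ⟨_, rfl⟩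
        obtain ⟨d, hd⟩ : ∃ d, cs'.dropWhile PySem.Chars.isalnum = d := ⟨_, rfl⟩
        have hcs' : t ++ d = cs' := by rw [← ht, ← hd]; exact List.takeWhile_append_dropWhile
        have htal : ∀ x ∈ t, PySem.Chars.isalnum x = true := by
          intro x hx; exact List.mem_takeWhile_imp (ht ▸ hx)
        have hraw : pvRaw (c :: cs') true = c :: (t ++ pvRaw d false) := by
          rw [pvRaw, if_pos hc,
            show pvRaw cs' false = t ++ pvRaw d false from by
              conv_lhs => rw [← hcs']
              exact pvRaw_run t d htal]
        have htok : altTokens (c :: cs') = (c :: t) :: altTokens d := by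
          rw [altTokens, if_pos hc, ht, hd]
        have hdlen : d.length ≤ n := by
          have h1 : d.length ≤ cs'.length := hd ▸ List.length_dropWhile_le _ _
          simp only [List.length_cons] at hlen; omega
        have hIH := ih d hdlen
        have hhd := List.head?_dropWhile_not PySem.Chars.isalnum cs'
        rw [hd] at hhd
        rw [hraw, htok]
        cases d with
        | nil =>
          simp only [pvRaw, List.append_nil]
          have hns : ∀ x ∈ c :: t, PySem.Chars.isspace x = false := by
            intro x hx
            rcases List.mem_cons.mp hx with hx | hx
            · exact hx ▸ pvAlnumNotSpace hc
            · exact pvAlnumNotSpace (htal x hx)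
          rw [altTokens]
          simpa [PySem.Chars.join, List.intercalate] using pvRstrip_of_noSpace _ hns
        | cons e d' =>
          have he : PySem.Chars.isalnum e = false := by simpa using hhd
          have hrawd : pvRaw (e :: d') false = ' ' :: pvRaw d' true := by
            simp [pvRaw, he]
          have hrawdT : pvRaw (e :: d') true = pvRaw d' true := by
            simp [pvRaw, he]
          by_cases hany : ∀ x ∈ e :: d', PySem.Chars.isalnum x = false
          · -- no further token: one trailing space, stripped
            have h1 : pvRaw (e :: d') true = [] := pvRaw_true_of_none _ hany
            have h2 : altTokens (e :: d') = [] := pvAltTokens_of_none _ hany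
            rw [h2, hrawd, hrawdT.symm.trans h1]
            have hns : ∀ x ∈ c :: t, PySem.Chars.isspace x = false := by
              intro x hx
              rcases List.mem_cons.mp hx with hx | hx
              · exact hx ▸ pvAlnumNotSpace hc
              · exact pvAlnumNotSpace (htal x hx)
            have hsp : PySem.Chars.isspace ' ' = true := by decide
            have hstep : PySem.Chars.rstrip ((c :: t) ++ [' ']) = PySem.Chars.rstrip (c :: t) := by
              unfold PySem.Chars.rstrip
              rw [List.reverse_append]
              simp [hsp]
            have : PySem.Chars.rstrip ((c :: t) ++ [' ']) = c :: t := by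
              rw [hstep, pvRstrip_of_noSpace _ hns]
            simpa [PySem.Chars.join, List.intercalate] using this
          · -- a further token exists
            push_neg at hany
            obtain ⟨x, hxmem, hxal⟩ := hany
            have hxal : PySem.Chars.isalnum x = true := by simpa using hxal
            have htne : altTokens (e :: d') ≠ [] := pvAltTokens_ne_nil _ x hxmem hxal
            obtain ⟨u, us, hu⟩ : ∃ u us, altTokens (e :: d') = u :: us := by
              cases h : altTokens (e :: d') with
              | nil => exact absurd h htne
              | cons u us => exact ⟨u, us, rfl⟩
            have hune : u ≠ [] := pvAltTokens_tokens_ne_nil (e :: d').length (e :: d') le_rfl u (hu ▸ List.mem_cons_self)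
            obtain ⟨a, u', ha⟩ : ∃ a u', u = a :: u' := by
              cases u with
              | nil => exact absurd rfl hune
              | cons a u' => exact ⟨a, u', rfl⟩
            have hIH' : PySem.Chars.rstrip (pvRaw d' true)
                = PySem.Chars.join [' '] (altTokens (e :: d')) := by
              rw [← hrawdT]; exact hIH
            have hJne : PySem.Chars.rstrip (pvRaw d' true) ≠ [] := by
              rw [hIH', hu, ha]; exact pvJoin_ne_nil a u' us
            have step2 : PySem.Chars.rstrip (' ' :: pvRaw d' true)
                = ' ' :: PySem.Chars.rstrip (pvRaw d' true) := by
              have := pvRstrip_append [' '] (pvRaw d' true) hJne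
              simpa using this
            have hsne : PySem.Chars.rstrip (' ' :: pvRaw d' true) ≠ [] := by
              rw [step2]; simp
            have step1 : PySem.Chars.rstrip (c :: (t ++ ' ' :: pvRaw d' true))
                = (c :: t) ++ PySem.Chars.rstrip (' ' :: pvRaw d' true) := by
              have := pvRstrip_append (c :: t) (' ' :: pvRaw d' true) hsne
              simpa using this
            rw [hrawd, step1, step2, hIH', hu, ha]
            simp [PySem.Chars.join, List.intercalate]
      · -- non-alnum first char: both sides skip it
        have hraw : pvRaw (c :: cs') true = pvRaw cs' true := by simp [pvRaw, hc]
        have htok : altTokens (c :: cs') = altTokens cs' := by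
          rw [altTokens, if_neg (by simp [hc])]
        rw [hraw, htok]
        exact ih cs' (by simp only [List.length_cons] at hlen; omega)

lemma pvLstrip_raw_true (cs : List Char) :
    PySem.Chars.lstrip (pvRaw cs true) = pvRaw cs true := by
  induction cs with
  | nil => rfl
  | cons c cs ih =>
    by_cases h : PySem.Chars.isalnum c = true
    · simp [pvRaw, h, PySem.Chars.lstrip, pvAlnumNotSpace h]
    · simpa [pvRaw, h] using ih

lemma pvLstrip_raw_false (cs : List Char) :
    PySem.Chars.lstrip (pvRaw cs false) = pvRaw cs true := by
  induction cs with
  | nil => rfl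
  | cons c cs ih =>
    by_cases h : PySem.Chars.isalnum c = true
    · simp [pvRaw, h, PySem.Chars.lstrip, pvAlnumNotSpace h]
    · have hsp : PySem.Chars.isspace ' ' = true := by decide
      have hr : pvRaw (c :: cs) false = ' ' :: pvRaw cs true := by
        rw [pvRaw, if_neg (by simp [h])]; simp
      have h2 : pvRaw (c :: cs) true = pvRaw cs true := by
        rw [pvRaw, if_neg (by simp [h])]; simp
      rw [hr, h2]
      show List.dropWhile PySem.Chars.isspace (' ' :: pvRaw cs true) = pvRaw cs true
      rw [List.dropWhile_cons, if_pos hsp]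
      exact pvLstrip_raw_true cs

-- ===== VERDICT (by name: the statement is the Claim_ definition above) =====
theorem normalize_station_name_spec : Claim_equal_normalize_station_name := by
  intro value _
  show normalize_station_name value = normalize_station_name_alt value
  show String.ofList (PySem.Chars.strip
      ((PySem.Chars.lower (if value = "" then "" else value).toList).foldl pvStep ([], false)).1)
    = String.ofList (PySem.Chars.join [' ']
      (altTokens (PySem.Chars.lower (if value = "" then "" else value).toList)))
  congr 1
  rw [pvFold_fst, List.nil_append, PySem.Chars.strip, pvLstrip_raw_false]
  exact pvMain _ _ le_rfl
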